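-- pv_equiv track=rewrite | github.com/yashgandhi876/Global-Coding-Challenge-credit-suisse-2020 | GCC-easy-yashgandhi876/Question3/Question3.py | find_min_days
-- ===== SOURCE A (Python) =====
-- def find_min_days(prices, profit):
--     # Participants code will be here
--     ptl = len(profit)
--     psl = len(prices)
--     buyDay = -1
--     sellDay = -1
--     stri = ""
--     for i in range(ptl):
--         setflag = False
--         for j in range(psl):
--             for k in range(j+1, psl):
--                 if((prices[k] - prices[j]) == profit[i]):
--                     if(buyDay != -1):
--                         if(sellDay >= k):
--                             sellDay = k
--                             buyDay = j
--                     else: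
--                         buyDay = j
--                         sellDay = k
--                     setflag = True
--         if(buyDay == -1 and sellDay == -1):
--                 stri += "-1"
--         else:
--             if(setflag):
--                 stri += f'{buyDay+1} {sellDay+1}'
--             else:
--                 stri += "-1"
--         if(i != ptl-1):
--             stri += ","
--     if(stri == "-1,"):
--         return stri[:-1]
--     return stri.strip()
-- ===== SOURCE B (Python) =====
-- def find_min_days(prices, profit):
--     # One O(len(prices)) pass per profit target using a price -> last-index map,
--     # instead of A's triple nested loop.  The (buy, sell) state is threaded
--     # across targets exactly as the original does.
--     buy, sell = -1, -1
--     parts = []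
--     for p in profit:
--         hit = None
--         last = {}
--         for k, v in enumerate(prices):
--             j = last.get(v - p)
--             if j is not None:
--                 hit = (j, k)
--                 break
--             last[v] = k
--         if hit is None:
--             parts.append("-1")
--         else:
--             j, k = hit
--             if buy == -1 or k <= sell:
--                 buy, sell = j, k
--             parts.append(f"{buy+1} {sell+1}")
--     return ",".join(parts)
-- ===== Notes on version B (the rewrite author's own statement) =====
-- stated objective: faster
-- what changed: Replaces the triple nested loop (all (j,k) pairs re-scanned for every profit target) with one linear pass per target over prices using a price->last-index hashmap that yields the earliest sell day and its latest matching buy day directly; the (buy,sell) carry-over state across targets and the output formatting are reproduced exactly.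
import Mathlib
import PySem

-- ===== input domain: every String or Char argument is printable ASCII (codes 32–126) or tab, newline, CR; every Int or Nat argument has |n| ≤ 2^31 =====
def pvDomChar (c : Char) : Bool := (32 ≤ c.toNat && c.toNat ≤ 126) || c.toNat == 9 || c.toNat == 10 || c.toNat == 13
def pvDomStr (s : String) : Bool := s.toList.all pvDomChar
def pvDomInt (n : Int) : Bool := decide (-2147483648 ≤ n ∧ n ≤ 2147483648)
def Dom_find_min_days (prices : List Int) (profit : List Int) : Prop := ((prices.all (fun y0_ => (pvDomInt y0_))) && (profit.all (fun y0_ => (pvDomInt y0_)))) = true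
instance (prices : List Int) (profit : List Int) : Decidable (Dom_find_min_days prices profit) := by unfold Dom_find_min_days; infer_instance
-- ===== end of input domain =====

-- B replaces A's triple nested loop by one linear pass per profit target with a
-- price -> last-index map (asymptotically faster); return values agree on all inputs.

-- ===== PORT A =====
-- every index access is inside the range produced by `range(...)`, so `pyGetD _ _ 0` is exact
def pvA_stepK (prices : List Int) (p : Int) (j : Int) (st : Int × Int × Bool) (k : Int) :
    Int × Int × Bool :=
  if PySem.List.pyGetD prices k 0 - PySem.List.pyGetD prices j 0 = p then
    if st.1 ≠ -1 then
      if st.2.1 ≥ k then (j, k, true) else (st.1, st.2.1, true)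
    else (j, k, true)
  else st

def pvA_inner (prices : List Int) (p : Int) (st : Int × Int × Bool) : Int × Int × Bool :=
  (PySem.List.pyRange 0 (PySem.List.len prices) 1).foldl
    (fun st j =>
      (PySem.List.pyRange (j + 1) (PySem.List.len prices) 1).foldl (pvA_stepK prices p j) st)
    st

-- the body of the outer `for i in range(ptl)` loop
def pvA_body (prices : List Int) (profit : List Int) (acc : Int × Int × String) (i : Int) :
    Int × Int × String :=
  let st := pvA_inner prices (PySem.List.pyGetD profit i 0) (acc.1, acc.2.1, false)
  let stri := if st.1 = -1 ∧ st.2.1 = -1 then acc.2.2 ++ "-1"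
    else if st.2.2 then
      acc.2.2 ++ (PySem.Int.toStr (st.1 + 1) ++ " " ++ PySem.Int.toStr (st.2.1 + 1))
    else acc.2.2 ++ "-1"
  let stri := if i ≠ (PySem.List.len profit) - 1 then stri ++ "," else stri
  (st.1, st.2.1, stri)

def find_min_days (prices : List Int) (profit : List Int) : String :=
  let res := (PySem.List.pyRange 0 (PySem.List.len profit) 1).foldl (pvA_body prices profit)
    ((-1 : Int), (-1 : Int), ("" : String))
  if res.2.2 = "-1," then PySem.Str.slice res.2.2 none (some (-1)) else PySem.Str.strip res.2.2

-- ===== PORT B =====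
-- `for k, v in enumerate(prices): ... break` with the price -> last-index dict
def pvB_scan (p : Int) (last : PySem.Dict Int Int) : List (Int × Int) → Option (Int × Int)
  | [] => none
  | (k, v) :: rest =>
    match last.get? (v - p) with
    | some j => some (j, k)
    | none => pvB_scan p (last.insert v k) rest

def find_min_days_alt (prices : List Int) (profit : List Int) : String :=
  let res := profit.foldl (fun acc p =>
      match pvB_scan p PySem.Dict.empty (PySem.List.enumerate prices 0) with
      | none => (acc.1, acc.2 ++ ["-1"])
      | some (j, k) =>
        let bs := if acc.1.1 = -1 ∨ k ≤ acc.1.2 then (j, k) else acc.1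
        (bs, acc.2 ++ [PySem.Int.toStr (bs.1 + 1) ++ " " ++ PySem.Int.toStr (bs.2 + 1)]))
    (((-1 : Int), (-1 : Int)), ([] : List String))
  PySem.Str.join "," res.2

-- ===== PRECONDITION & SPEC =====
def Spec_find_min_days (prices : List Int) (profit : List Int) (out : String) : Prop := out = find_min_days_alt prices profit
instance (prices : List Int) (profit : List Int) (out : String) : Decidable (Spec_find_min_days prices profit out) := by unfold Spec_find_min_days; infer_instance

-- ===== CLAIM (what is proved, stated in full; the proofs are below) =====
def Claim_equal_find_min_days : Prop := ∀ (prices : List Int) (profit : List Int), Dom_find_min_days prices profit → Spec_find_min_days prices profit (find_min_days prices profit)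

-- ===== LEMMAS AND PROOFS =====

/-- `(j, k)` is a valid buy/sell pair for target `p`. -/
def pvMatch (prices : List Int) (p j k : Int) : Prop :=
  0 ≤ j ∧ j < k ∧ (k : Int) < prices.length ∧
    PySem.List.pyGetD prices k 0 - PySem.List.pyGetD prices j 0 = p

/-- `q` is the pair with the minimal sell day and, for that sell day, the maximal buy day. -/
def pvBest (prices : List Int) (p : Int) (q : Int × Int) : Prop :=
  pvMatch prices p q.1 q.2 ∧ (∀ j k, pvMatch prices p j k → q.2 ≤ k) ∧
    (∀ j, pvMatch prices p j q.2 → j ≤ q.1)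

lemma pvBest_unique {prices : List Int} {p : Int} {q q' : Int × Int}
    (h : pvBest prices p q) (h' : pvBest prices p q') : q = q' := by
  obtain ⟨hm, hk, hj⟩ := h
  obtain ⟨hm', hk', hj'⟩ := h'
  have h1 : q.2 ≤ q'.2 := hk q'.1 q'.2 hm'
  have h2 : q'.2 ≤ q.2 := hk' q.1 q.2 hm
  have hks : q.2 = q'.2 := le_antisymm h1 h2
  have h3 : q.1 ≤ q'.1 := hj' q.1 (hks ▸ hm)
  have h4 : q'.1 ≤ q.1 := hj q'.1 (hks ▸ hm')
  exact Prod.ext (le_antisymm h3 h4) hks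

-- ---------- B-side: the scan finds the best pair ----------

/-- dict invariant: `last` maps each value occurring in `prices[:m]` to its last index there. -/
def pvLastInv (prices : List Int) (m : Nat) (last : PySem.Dict Int Int) : Prop :=
  (∀ x j, last.get? x = some j →
      ∃ jn : Nat, j = (jn : Int) ∧ jn < m ∧ prices.getD jn 0 = x ∧
        ∀ j' : Nat, jn < j' → j' < m → prices.getD j' 0 ≠ x) ∧
  (∀ jn : Nat, jn < m → (last.get? (prices.getD jn 0)).isSome)

lemma pvMatch_elim {prices : List Int} {p j k : Int} (h : pvMatch prices p j k) :
    ∃ (jn kn : Nat), j = (jn : Int) ∧ k = (kn : Int) ∧ jn < kn ∧ kn < prices.length ∧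
      prices.getD kn 0 - prices.getD jn 0 = p := by
  obtain ⟨h1, h2, h3, h4⟩ := h
  refine ⟨j.toNat, k.toNat, by omega, by omega, by omega, by omega, ?_⟩
  rw [PySem.List.pyGetD_eq_getElem prices 0 (by omega) h3,
    PySem.List.pyGetD_eq_getElem prices 0 (by omega) (by omega)] at h4
  rw [List.getD_eq_getElem _ _ (by omega), List.getD_eq_getElem _ _ (by omega)]
  exact h4


lemma pvMatch_intro {prices : List Int} {p : Int} {jn kn : Nat} (h1 : jn < kn)
    (h2 : kn < prices.length) (h3 : prices.getD kn 0 - prices.getD jn 0 = p) :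
    pvMatch prices p (jn : Int) (kn : Int) := by
  refine ⟨by omega, by omega, by omega, ?_⟩
  rw [PySem.List.pyGetD_natCast, PySem.List.pyGetD_natCast]
  exact h3


lemma pvB_scan_go (prices : List Int) (p : Int) :
    ∀ (fuel m : Nat) (last : PySem.Dict Int Int),
      prices.length ≤ m + fuel →
      pvLastInv prices m last →
      (∀ j k, pvMatch prices p j k → (m : Int) ≤ k) →
      (pvB_scan p last (PySem.List.enumerate (prices.drop m) (m : Int)) = none ∧
        ∀ j k, ¬ pvMatch prices p j k) ∨
      (∃ q, pvB_scan p last (PySem.List.enumerate (prices.drop m) (m : Int)) = some q ∧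
        pvBest prices p q) := by
  intro fuel
  induction fuel with
  | zero =>
    intro m last hlen _ hnm
    left
    have hdrop : prices.drop m = [] := by
      apply List.drop_eq_nil_of_le; omega
    rw [hdrop]
    refine ⟨rfl, ?_⟩
    intro j k hm
    have := hnm j k hm
    obtain ⟨_, _, h3, _⟩ := hm
    omega
  | succ fuel ih =>
    intro m last hlen hinv hnm
    by_cases hm : m < prices.length
    case neg =>
      left
      have hdrop : prices.drop m = [] := by
        apply List.drop_eq_nil_of_le; omega
      rw [hdrop]
      refine ⟨rfl, ?_⟩
      intro j k hmm
      have := hnm j k hmm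
      obtain ⟨_, _, h3, _⟩ := hmm
      omega
    case pos =>
      have hdrop : prices.drop m = prices[m] :: prices.drop (m + 1) :=
        List.drop_eq_getElem_cons hm
      rw [hdrop, PySem.List.enumerate_cons]
      show _ ∨ _
      rcases hget : last.get? (prices[m] - p) with _ | j
      case some =>
        -- found: best pair is (j, m)
        right
        obtain ⟨jn, rfl, hjm, hval, hlastocc⟩ := hinv.1 _ _ hget
        refine ⟨((jn : Int), (m : Int)), by simp [pvB_scan, hget], ?_, ?_, ?_⟩
        · -- it is a match
          apply pvMatch_intro hjm hm
          rw [List.getD_eq_getElem _ _ hm, hval]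
          ring
        · -- minimal sell day
          intro j k hmm
          exact hnm j k hmm
        · -- maximal buy day for that sell day
          intro j hmm
          obtain ⟨j2, k2, rfl, hk2, hjk2, _, hdiff⟩ := pvMatch_elim hmm
          have hk2m : k2 = m := by simpa using hk2.symm
          subst hk2m
          by_contra hgt
          push Not at hgt
          have hjn2 : jn < j2 := by simpa using hgt
          apply hlastocc j2 hjn2 (by omega)
          rw [List.getD_eq_getElem _ _ hm] at hdiff
          omega
      case none =>
        have step : pvB_scan p last (((m : Int), prices[m]) :: PySem.List.enumerate (prices.drop (m+1)) ((m:Int)+1))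
            = pvB_scan p (last.insert prices[m] (m : Int)) (PySem.List.enumerate (prices.drop (m+1)) ((m:Int)+1)) := by
          simp [pvB_scan, hget]
        rw [step]
        have hcast : ((m : Int) + 1) = (((m + 1 : Nat)) : Int) := by omega
        rw [hcast]
        apply ih (m + 1) (last.insert prices[m] (m : Int)) (by omega)
        · -- invariant
          constructor
          · intro x j hj
            rcases eq_or_ne x prices[m] with rfl | hne
            · rw [PySem.Dict.get?_insert_self] at hj
              injection hj with hj
              refine ⟨m, hj.symm, by omega, List.getD_eq_getElem _ _ hm, ?_⟩
              intro j' h1 h2 _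
              omega
            · rw [PySem.Dict.get?_insert_of_ne _ _ hne] at hj
              obtain ⟨jn, rfl, hjm, hval, hlast⟩ := hinv.1 _ _ hj
              refine ⟨jn, rfl, by omega, hval, ?_⟩
              intro j' h1 h2 hval'
              rcases Nat.lt_or_ge j' m with h | h
              · exact hlast j' h1 h hval'
              · have : j' = m := by omega
                subst this
                rw [List.getD_eq_getElem _ _ hm] at hval'
                exact hne (hval' ▸ rfl)
          · intro jn hjn
            rcases Nat.lt_or_ge jn m with h | h
            · rcases eq_or_ne (prices.getD jn 0) prices[m] with heq | hne
              · rw [heq, PySem.Dict.get?_insert_self]; rfl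
              · rw [PySem.Dict.get?_insert_of_ne _ _ hne]
                exact hinv.2 jn h
            · have : jn = m := by omega
              subst this
              rw [List.getD_eq_getElem _ _ hm, PySem.Dict.get?_insert_self]
              rfl
        · -- no match below m + 1
          intro j k hmm
          have hge := hnm j k hmm
          rcases Nat.lt_or_ge m k.toNat with h | h
          · omega
          · -- k = m: contradiction with hget = none
            exfalso
            obtain ⟨jn, kn, rfl, rfl, hjk, hkn, hdiff⟩ := pvMatch_elim hmm
            have hkm : kn = m := by omega
            rw [hkm] at hdiff hjk
            have hsome := hinv.2 jn (by omega)
            have hvj : prices.getD jn 0 = prices[m] - p := by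
              rw [List.getD_eq_getElem _ _ hm] at hdiff
              omega
            rw [hvj, hget] at hsome
            simp at hsome

lemma pvB_scan_top (prices : List Int) (p : Int) :
    (pvB_scan p PySem.Dict.empty (PySem.List.enumerate prices 0) = none ∧
      ∀ j k, ¬ pvMatch prices p j k) ∨
    (∃ q, pvB_scan p PySem.Dict.empty (PySem.List.enumerate prices 0) = some q ∧
      pvBest prices p q) := by
  have h := pvB_scan_go prices p prices.length 0 PySem.Dict.empty (by omega) ?_ ?_
  · simpa using h
  · constructor
    · intro x j hj
      rw [PySem.Dict.get?_empty] at hj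
      exact absurd hj (by simp)
    · intro jn hjn
      omega
  · intro j k hm
    obtain ⟨h1, h2, _, _⟩ := hm
    omega

-- ---------- A-side: the triple loop computes the same best pair ----------

def pvPairs (n : Int) : List (Int × Int) :=
  (PySem.List.pyRange 0 n 1).flatMap
    (fun j => (PySem.List.pyRange (j + 1) n 1).map (fun k => (j, k)))

def pvStep3 (st : Int × Int × Bool) (q : Int × Int) : Int × Int × Bool :=
  if st.1 ≠ -1 then
    if st.2.1 ≥ q.2 then (q.1, q.2, true) else (st.1, st.2.1, true)
  else (q.1, q.2, true)

def pvUpd (o : Option (Int × Int)) (q : Int × Int) : Option (Int × Int) :=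
  match o with
  | none => some q
  | some r => if q.2 ≤ r.2 then some q else some r

def pvP (prices : List Int) (p : Int) : List (Int × Int) :=
  (pvPairs (PySem.List.len prices)).filter
    (fun q => decide (PySem.List.pyGetD prices q.2 0 - PySem.List.pyGetD prices q.1 0 = p))

def pvLexLt (a b : Int × Int) : Prop := a.1 < b.1 ∨ (a.1 = b.1 ∧ a.2 < b.2)

lemma pvA_inner_eq_foldP (prices : List Int) (p : Int) (st : Int × Int × Bool) :
    pvA_inner prices p st = (pvP prices p).foldl pvStep3 st := by
  unfold pvA_inner pvP pvPairs
  rw [List.foldl_filter, List.foldl_flatMap]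
  congr 1
  funext st j
  rw [List.foldl_map]
  congr 1
  funext st' k
  simp only [pvA_stepK, pvStep3]
  split <;> simp_all


lemma pvUpd_seeded : ∀ (P : List (Int × Int)) (b s : Int),
    P.foldl pvUpd (some (b, s)) =
      match P.foldl pvUpd none with
      | none => some (b, s)
      | some q => if q.2 ≤ s then some q else some (b, s) := by
  intro P
  induction P with
  | nil => intro b s; rfl
  | cons q rest ih =>
    intro b s
    obtain ⟨j, k⟩ := q
    simp only [List.foldl_cons, pvUpd]
    rw [ih j k]
    by_cases hks : k ≤ s
    · simp only [if_pos hks]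
      rw [ih j k]
      rcases h : rest.foldl pvUpd none with _ | q'
      · simp [hks]
      · by_cases h1 : q'.2 ≤ k <;> by_cases h2 : q'.2 ≤ s <;> simp [h1, h2] <;> omega
    · simp only [if_neg hks]
      rw [ih b s]
      rcases h : rest.foldl pvUpd none with _ | q'
      · simp [hks]
      · by_cases h1 : q'.2 ≤ k <;> by_cases h2 : q'.2 ≤ s <;> simp [h1, h2] <;> omega


lemma pvUpd_some : ∀ (P : List (Int × Int)) (r : Int × Int),
    (P.foldl pvUpd (some r)).isSome := by
  intro P
  induction P with
  | nil => intro r; rfl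
  | cons q rest ih =>
    intro r
    simp only [List.foldl_cons, pvUpd]
    split <;> apply ih

lemma pvUpd_none_iff : ∀ (P : List (Int × Int)),
    P.foldl pvUpd none = none ↔ P = [] := by
  intro P
  cases P with
  | nil => simp
  | cons q rest =>
    simp only [List.foldl_cons, pvUpd]
    constructor
    · intro h
      have := pvUpd_some rest q
      rw [h] at this; exact absurd this (by simp)
    · intro h; exact absurd h (by simp)


lemma pvStep3_foldl : ∀ (P : List (Int × Int)) (b s : Int) (f : Bool),
    (∀ q ∈ P, 0 ≤ q.1) →
    P.foldl pvStep3 (b, s, f) =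
      match P.foldl pvUpd none with
      | none => (b, s, f)
      | some q => if b = -1 ∨ q.2 ≤ s then (q.1, q.2, true) else (b, s, true) := by
  intro P
  induction P with
  | nil => intro b s f _; rfl
  | cons q rest ih =>
    intro b s f hpos
    obtain ⟨j, k⟩ := q
    have hj : (0:Int) ≤ j := hpos (j, k) (by simp)
    have hrest : ∀ q ∈ rest, (0:Int) ≤ q.1 := fun q hq => hpos q (by simp [hq])
    simp only [List.foldl_cons, pvUpd]
    rw [pvUpd_seeded rest j k]
    by_cases hb : b = -1
    · have : pvStep3 (b, s, f) (j, k) = (j, k, true) := by simp [pvStep3, hb]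
      rw [this, ih j k true hrest]
      rcases h : rest.foldl pvUpd none with _ | q'
      · simp; omega
      · by_cases h1 : q'.2 ≤ k
        · simp only [if_pos h1]
          have : ¬ (j = -1) := by omega
          simp [this, h1, hb]
        · simp only [if_neg h1]
          have : ¬ (j = -1) := by omega
          simp [this, h1, hb]
    · by_cases hks : s ≥ k
      · have : pvStep3 (b, s, f) (j, k) = (j, k, true) := by simp [pvStep3, hb, hks]
        rw [this, ih j k true hrest]
        rcases h : rest.foldl pvUpd none with _ | q'
        · simp [hb]; omega
        · by_cases h1 : q'.2 ≤ k <;>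
            simp [h1, hb, (by omega : k ≤ s)] <;> omega
      · have : pvStep3 (b, s, f) (j, k) = (b, s, true) := by simp [pvStep3, hb, hks]
        rw [this, ih b s true hrest]
        rcases h : rest.foldl pvUpd none with _ | q'
        · simp [hb]; omega
        · by_cases h1 : q'.2 ≤ k <;> by_cases h2 : q'.2 ≤ s <;> simp [h1, h2, hb] <;> omega


lemma mem_pvPairs (n : Int) (q : Int × Int) : q ∈ pvPairs n ↔ 0 ≤ q.1 ∧ q.1 < q.2 ∧ q.2 < n := by
  obtain ⟨j, k⟩ := q
  simp only [pvPairs, List.mem_flatMap, List.mem_map, PySem.List.mem_pyRange_one]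
  constructor
  · rintro ⟨j', ⟨h1, h2⟩, k', ⟨h3, h4⟩, h5⟩
    obtain ⟨rfl, rfl⟩ := Prod.mk.inj h5
    exact ⟨h1, by omega, h4⟩
  · rintro ⟨h1, h2, h3⟩
    exact ⟨j, ⟨h1, by omega⟩, k, ⟨by omega, h3⟩, rfl⟩

lemma mem_pvP (prices : List Int) (p : Int) (q : Int × Int) :
    q ∈ pvP prices p ↔ pvMatch prices p q.1 q.2 := by
  rw [pvP, List.mem_filter, mem_pvPairs, pvMatch, PySem.List.len_eq]
  simp only [decide_eq_true_eq]
  tauto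


lemma pairwise_pvP (prices : List Int) (p : Int) : (pvP prices p).Pairwise pvLexLt := by
  apply List.Pairwise.filter
  unfold pvPairs
  rw [List.pairwise_flatMap]
  constructor
  · intro a _
    apply List.Pairwise.map
    · intro x y (hxy : x < y)
      exact Or.inr ⟨rfl, hxy⟩
    · exact PySem.List.pairwise_lt_pyRange_one _ _
  · apply List.Pairwise.imp ?_ (PySem.List.pairwise_lt_pyRange_one 0 (PySem.List.len prices))
    intro a b hab x hx y hy
    simp only [List.mem_map] at hx hy
    obtain ⟨k1, _, rfl⟩ := hx
    obtain ⟨k2, _, rfl⟩ := hy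
    exact Or.inl hab


lemma pvUpd_best : ∀ (P : List (Int × Int)), P.Pairwise pvLexLt →
    ∀ q, P.foldl pvUpd none = some q →
      q ∈ P ∧ (∀ r ∈ P, q.2 ≤ r.2) ∧ (∀ r ∈ P, r.2 = q.2 → r.1 ≤ q.1) := by
  intro P
  induction P with
  | nil => intro _ q h; simp at h
  | cons a rest ih =>
    intro hpw q h
    obtain ⟨j, k⟩ := a
    have hpw' : rest.Pairwise pvLexLt := (List.pairwise_cons.mp hpw).2
    have hhead : ∀ r ∈ rest, pvLexLt (j, k) r := (List.pairwise_cons.mp hpw).1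
    simp only [List.foldl_cons, pvUpd] at h
    rw [pvUpd_seeded rest j k] at h
    rcases hr : rest.foldl pvUpd none with _ | q'
    · rw [hr] at h
      simp at h
      have : rest = [] := (pvUpd_none_iff rest).mp hr
      subst this
      simp [← h]
    · rw [hr] at h
      obtain ⟨hmem, hmin, hmax⟩ := ih hpw' q' hr
      simp only at h
      by_cases h1 : q'.2 ≤ k
      · rw [if_pos h1] at h
        injection h with h; subst h
        refine ⟨by simp [hmem], ?_, ?_⟩
        · intro r hr'
          rcases List.mem_cons.mp hr' with h' | h'
          · subst h'; exact h1
          · exact hmin r h'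
        · intro r hr' hr2
          rcases List.mem_cons.mp hr' with h' | h'
          · subst h'
            rcases hhead q' hmem with hlt | ⟨heq, hlt⟩
            · omega
            · simp only at heq hlt; omega
          · exact hmax r h' hr2
      · rw [if_neg h1] at h
        injection h with h; subst h
        refine ⟨by simp, ?_, ?_⟩
        · intro r hr'
          rcases List.mem_cons.mp hr' with h' | h'
          · subst h'; exact le_refl _
          · have := hmin r h'; simp only; omega
        · intro r hr' hr2
          rcases List.mem_cons.mp hr' with h' | h'
          · subst h'; exact le_refl _
          · have := hmin r h'; simp only at hr2 ⊢; omega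


/-- A's inner double loop, started on state `(b, s, false)`, agrees with B's scan. -/
lemma pvA_inner_eq_scan (prices : List Int) (p : Int) (b s : Int) :
    pvA_inner prices p (b, s, false) =
      match pvB_scan p PySem.Dict.empty (PySem.List.enumerate prices 0) with
      | none => (b, s, false)
      | some q => if b = -1 ∨ q.2 ≤ s then (q.1, q.2, true) else (b, s, true) := by
  rw [pvA_inner_eq_foldP]
  rw [pvStep3_foldl (pvP prices p) b s false
    (fun q hq => ((mem_pvP prices p q).mp hq).1)]
  rcases pvB_scan_top prices p with ⟨hnone, hnomatch⟩ | ⟨q, hsome, hbest⟩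
  · rw [hnone]
    have hP : pvP prices p = [] := by
      rw [List.eq_nil_iff_forall_not_mem]
      intro q hq
      exact hnomatch q.1 q.2 ((mem_pvP prices p q).mp hq)
    rw [(pvUpd_none_iff (pvP prices p)).mpr hP]
  · rw [hsome]
    have hPne : pvP prices p ≠ [] := by
      intro h
      have := (mem_pvP prices p q).mpr hbest.1
      rw [h] at this
      simp at this
    rcases hq' : (pvP prices p).foldl pvUpd none with _ | q'
    · exact absurd ((pvUpd_none_iff _).mp hq') hPne
    · obtain ⟨hmem, hmin, hmax⟩ := pvUpd_best _ (pairwise_pvP prices p) q' hq'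
      have hbest' : pvBest prices p q' := by
        refine ⟨(mem_pvP prices p q').mp hmem, ?_, ?_⟩
        · intro j k hm
          exact hmin (j, k) ((mem_pvP prices p (j, k)).mpr hm)
        · intro j hm
          exact hmax (j, q'.2) ((mem_pvP prices p (j, q'.2)).mpr hm) rfl
      rw [pvBest_unique hbest' hbest]

lemma pvB_scan_best (prices : List Int) (p : Int) (q : Int × Int)
    (h : pvB_scan p PySem.Dict.empty (PySem.List.enumerate prices 0) = some q) :
    pvBest prices p q := by
  rcases pvB_scan_top prices p with ⟨hnone, _⟩ | ⟨q', hsome, hbest⟩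
  · rw [hnone] at h; exact absurd h (by simp)
  · rw [hsome] at h; injection h with h; exact h ▸ hbest

-- ---------- outer loops ----------

def pvStep1 (prices : List Int) (bs : Int × Int) (p : Int) : (Int × Int) × String :=
  match pvB_scan p PySem.Dict.empty (PySem.List.enumerate prices 0) with
  | none => (bs, "-1")
  | some (j, k) =>
    let bs' := if bs.1 = -1 ∨ k ≤ bs.2 then (j, k) else bs
    (bs', PySem.Int.toStr (bs'.1 + 1) ++ " " ++ PySem.Int.toStr (bs'.2 + 1))

def pvRunBS (prices : List Int) (bs : Int × Int) : List Int → Int × Int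
  | [] => bs
  | p :: rest => pvRunBS prices (pvStep1 prices bs p).1 rest

def pvRun (prices : List Int) (bs : Int × Int) : List Int → List String
  | [] => []
  | p :: rest => (pvStep1 prices bs p).2 :: pvRun prices (pvStep1 prices bs p).1 rest

lemma pvB_fold (prices : List Int) : ∀ (ps : List Int) (bs : Int × Int) (parts : List String),
    ps.foldl (fun acc p =>
      match pvB_scan p PySem.Dict.empty (PySem.List.enumerate prices 0) with
      | none => (acc.1, acc.2 ++ ["-1"])
      | some (j, k) =>
        let bs := if acc.1.1 = -1 ∨ k ≤ acc.1.2 then (j, k) else acc.1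
        (bs, acc.2 ++ [PySem.Int.toStr (bs.1 + 1) ++ " " ++ PySem.Int.toStr (bs.2 + 1)]))
      (bs, parts)
    = (pvRunBS prices bs ps, parts ++ pvRun prices bs ps) := by
  intro ps
  induction ps with
  | nil => intro bs parts; simp [pvRunBS, pvRun]
  | cons p rest ih =>
    intro bs parts
    simp only [List.foldl_cons]
    rcases h : pvB_scan p PySem.Dict.empty (PySem.List.enumerate prices 0) with _ | ⟨j, k⟩ <;>
      simp only [h, pvRun, pvRunBS, pvStep1, ih, List.append_assoc,
        List.cons_append, List.nil_append]

lemma pvB_alt_eq (prices profit : List Int) :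
    find_min_days_alt prices profit = PySem.Str.join "," (pvRun prices (-1, -1) profit) := by
  unfold find_min_days_alt
  rw [pvB_fold prices profit (-1, -1) []]
  simp

-- ---------- string-shape facts (no leading/trailing whitespace, last char a digit) ----------

def pvOk (s : String) : Prop :=
  (∃ c t, s.toList = c :: t ∧ PySem.Chars.isspace c = false) ∧
  (∃ c, s.toList.getLast? = some c ∧ PySem.Chars.isdigit c = true)

def pvGoodBS (bs : Int × Int) : Prop := bs = (-1, -1) ∨ (0 ≤ bs.1 ∧ 0 ≤ bs.2)

lemma pvDigitChar_digit (d : Nat) (h : d < 10) : PySem.Chars.isdigit (Nat.digitChar d) = true := by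
  interval_cases d <;> decide

lemma pvDigitsCore_digits : ∀ (f n : Nat) (l : List Char),
    (∀ c ∈ l, PySem.Chars.isdigit c = true) →
    ∀ c ∈ Nat.toDigitsCore 10 f n l, PySem.Chars.isdigit c = true := by
  intro f
  induction f with
  | zero => intro n l hl c hc; exact hl c hc
  | succ f ih =>
    intro n l hl c hc
    rw [Nat.toDigitsCore] at hc
    by_cases h : n / 10 = 0
    · rw [if_pos h] at hc
      rcases List.mem_cons.mp hc with h' | h'
      · subst h'; exact pvDigitChar_digit _ (Nat.mod_lt _ (by omega))
      · exact hl c h'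
    · rw [if_neg h] at hc
      refine ih (n / 10) _ ?_ c hc
      intro c' hc'
      rcases List.mem_cons.mp hc' with h' | h'
      · subst h'; exact pvDigitChar_digit _ (Nat.mod_lt _ (by omega))
      · exact hl c' h'

lemma pvDigitsCore_ne_nil : ∀ (f n : Nat) (l : List Char), l ≠ [] →
    Nat.toDigitsCore 10 f n l ≠ [] := by
  intro f
  induction f with
  | zero => intro n l hl; exact hl
  | succ f ih =>
    intro n l hl
    rw [Nat.toDigitsCore]
    by_cases h : n / 10 = 0
    · rw [if_pos h]; simp
    · rw [if_neg h]; exact ih _ _ (by simp)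

lemma pvToChars_pos (n : Int) (h : 1 ≤ n) :
    PySem.Int.toChars n ≠ [] ∧ ∀ c ∈ PySem.Int.toChars n, PySem.Chars.isdigit c = true := by
  rw [PySem.Int.toChars, if_neg (by omega)]
  constructor
  · rw [Nat.toDigits, Nat.toDigitsCore]
    by_cases h' : n.toNat / 10 = 0
    · rw [if_pos h']; simp
    · rw [if_neg h']; exact pvDigitsCore_ne_nil _ _ _ (by simp)
  · exact pvDigitsCore_digits _ _ _ (by simp)


lemma pvIsdigit_not_isspace (c : Char) (h : PySem.Chars.isdigit c = true) :
    PySem.Chars.isspace c = false := by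
  simp only [PySem.Chars.isdigit, Bool.and_eq_true, decide_eq_true_eq, Char.le_def] at h
  simp only [PySem.Chars.isspace, Bool.or_eq_false_iff, Bool.and_eq_false_iff,
    decide_eq_false_iff_not]
  obtain ⟨h1, h2⟩ := h
  have h1' : ('0' : Char).val.toNat ≤ c.val.toNat := by exact_mod_cast h1
  have h2' : c.val.toNat ≤ ('9' : Char).val.toNat := by exact_mod_cast h2
  have e1 : ('0' : Char).val.toNat = 48 := by decide
  have e2 : ('9' : Char).val.toNat = 57 := by decide
  unfold Char.toNat
  omega

lemma pvOk_neg1 : pvOk "-1" :=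
  ⟨⟨'-', ['1'], by decide, by decide⟩, '1', by decide, by decide⟩

lemma pvPair_ok (x y : Int) (hx : 0 ≤ x) (hy : 0 ≤ y) :
    pvOk (PySem.Int.toStr (x + 1) ++ " " ++ PySem.Int.toStr (y + 1)) := by
  obtain ⟨hne1, hdig1⟩ := pvToChars_pos (x + 1) (by omega)
  obtain ⟨hne2, hdig2⟩ := pvToChars_pos (y + 1) (by omega)
  have htl : (PySem.Int.toStr (x + 1) ++ " " ++ PySem.Int.toStr (y + 1)).toList
      = (PySem.Int.toChars (x + 1) ++ [' ']) ++ PySem.Int.toChars (y + 1) := by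
    simp [String.toList_append, PySem.Int.toList_toStr]
  constructor
  · rcases hx1 : PySem.Int.toChars (x + 1) with _ | ⟨c, t⟩
    · exact absurd hx1 hne1
    · refine ⟨c, (t ++ [' ']) ++ PySem.Int.toChars (y + 1), by rw [htl, hx1]; simp, ?_⟩
      exact pvIsdigit_not_isspace c (hdig1 c (by rw [hx1]; simp))
  · obtain ⟨d, hd⟩ := Option.isSome_iff_exists.mp (List.getLast?_isSome.mpr hne2)
    refine ⟨d, ?_, hdig2 d (List.mem_of_getLast? hd)⟩
    rw [htl, List.getLast?_append_of_ne_nil _ hne2]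
    exact hd

lemma pvJoin_singleton (s : String) : PySem.Str.join "," [s] = s := by
  simp [PySem.Str.join, PySem.Chars.join, List.intercalate, String.ofList_toList]

lemma pvJoin_cons (s : String) (l : List String) (h : l ≠ []) :
    PySem.Str.join "," (s :: l) = s ++ "," ++ PySem.Str.join "," l := by
  rcases l with _ | ⟨t, ts⟩
  · exact absurd rfl h
  · apply String.toList_inj.mp
    simp [PySem.Str.join, PySem.Chars.join, List.intercalate,
      String.toList_append]

lemma pvStep1_ok (prices : List Int) (bs : Int × Int) (p : Int) (h : pvGoodBS bs) :
    pvGoodBS (pvStep1 prices bs p).1 ∧ pvOk (pvStep1 prices bs p).2 := by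
  rcases hs : pvB_scan p PySem.Dict.empty (PySem.List.enumerate prices 0) with _ | ⟨j, k⟩
  · simp only [pvStep1, hs]
    exact ⟨h, pvOk_neg1⟩
  · have hbest := pvB_scan_best prices p (j, k) hs
    obtain ⟨⟨hj0, hjk, _, _⟩, _, _⟩ := hbest
    simp only [pvStep1, hs]
    by_cases hc : bs.1 = -1 ∨ k ≤ bs.2
    · simp only [if_pos hc]
      exact ⟨Or.inr ⟨hj0, by omega⟩, pvPair_ok j k hj0 (by omega)⟩
    · simp only [if_neg hc]
      have hbs : 0 ≤ bs.1 ∧ 0 ≤ bs.2 := by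
        rcases h with h | h
        · exact absurd (Or.inl (by rw [h])) hc
        · exact h
      exact ⟨Or.inr hbs, pvPair_ok bs.1 bs.2 hbs.1 hbs.2⟩

lemma pvRun_ok (prices : List Int) : ∀ (ps : List Int) (bs : Int × Int), pvGoodBS bs →
    ∀ pt ∈ pvRun prices bs ps, pvOk pt := by
  intro ps
  induction ps with
  | nil => intro bs _ pt hpt; simp [pvRun] at hpt
  | cons p rest ih =>
    intro bs hbs pt hpt
    obtain ⟨h1, h2⟩ := pvStep1_ok prices bs p hbs
    rcases List.mem_cons.mp hpt with h' | h'
    · exact h' ▸ h2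
    · exact ih (pvStep1 prices bs p).1 h1 pt h'

lemma pvJoin_ok (parts : List String) (hne : parts ≠ []) (h : ∀ pt ∈ parts, pvOk pt) :
    pvOk (PySem.Str.join "," parts) := by
  induction parts with
  | nil => exact absurd rfl hne
  | cons c rest ih =>
    rcases hr : rest with _ | ⟨t, ts⟩
    · rw [pvJoin_singleton]
      exact h c (by simp)
    · rw [← hr, pvJoin_cons c rest (by rw [hr]; simp)]
      have hcok := h c (by simp)
      have hjok : pvOk (PySem.Str.join "," rest) := by
        apply ih (by rw [hr]; simp)
        intro pt hpt
        exact h pt (by simp [hpt])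
      obtain ⟨⟨c1, t1, hct, hcs⟩, d1, hd1, hdig1⟩ := hcok
      obtain ⟨⟨c2, t2, hct2, hcs2⟩, d2, hd2, hdig2⟩ := hjok
      constructor
      · refine ⟨c1, (t1 ++ [',']) ++ (PySem.Str.join "," rest).toList, ?_, hcs⟩
        simp [String.toList_append, hct]
      · refine ⟨d2, ?_, hdig2⟩
        rw [String.toList_append, List.getLast?_append_of_ne_nil _ (by rw [hct2]; simp)]
        exact hd2

lemma pvStrip_id (s : String) (h : pvOk s) : PySem.Str.strip s = s := by
  obtain ⟨⟨c, t, hct, hcs⟩, d, hd, hdig⟩ := h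
  have hds := pvIsdigit_not_isspace d hdig
  apply String.toList_inj.mp
  rw [PySem.Str.toList_strip]
  have hl : PySem.Chars.lstrip s.toList = s.toList := by
    rw [PySem.Chars.lstrip, hct]
    simp [hcs]
  have hrevc : s.toList.reverse = d :: s.toList.reverse.tail := by
    apply List.eq_cons_of_mem_head?
    rw [List.head?_reverse, hd]
    simp
  have hr : PySem.Chars.rstrip s.toList = s.toList := by
    rw [PySem.Chars.rstrip, hrevc]
    simp only [List.dropWhile_cons, hds, Bool.false_eq_true, if_false]
    rw [← hrevc, List.reverse_reverse]
  rw [PySem.Chars.strip, hl, hr]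

lemma pvNe_dashonecomma (s : String) (h : pvOk s) : s ≠ "-1," := by
  intro heq
  obtain ⟨_, d, hd, hdig⟩ := h
  have htl : s.toList = ['-', '1', ','] := by rw [heq]; decide
  rw [htl] at hd
  have : d = ',' := by simpa using hd.symm
  subst this
  exact absurd hdig (by decide)

lemma pvA_body_eq (prices profit : List Int) (b s : Int) (stri : String) (i : Int) :
    pvA_body prices profit (b, s, stri) i =
      ((pvStep1 prices (b, s) (PySem.List.pyGetD profit i 0)).1.1,
       (pvStep1 prices (b, s) (PySem.List.pyGetD profit i 0)).1.2,
       if i ≠ PySem.List.len profit - 1 then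
         stri ++ (pvStep1 prices (b, s) (PySem.List.pyGetD profit i 0)).2 ++ ","
       else stri ++ (pvStep1 prices (b, s) (PySem.List.pyGetD profit i 0)).2) := by
  unfold pvA_body pvStep1
  rw [pvA_inner_eq_scan]
  rcases hs : pvB_scan (PySem.List.pyGetD profit i 0) PySem.Dict.empty
      (PySem.List.enumerate prices 0) with _ | ⟨j, k⟩
  · simp only
    split_ifs <;> first | rfl | exact (‹False›).elim
  · have hbest := pvB_scan_best _ _ _ hs
    obtain ⟨⟨hj0, hjk, _, _⟩, _, _⟩ := hbest
    simp only
    by_cases hc : b = -1 ∨ k ≤ s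
    · simp only [if_pos hc]
      have hne : ¬ (j = -1 ∧ k = -1) := by omega
      simp only [if_neg hne, if_true]
    · simp only [if_neg hc]
      have hne : ¬ (b = -1 ∧ s = -1) := by
        intro h; exact hc (Or.inl h.1)
      simp only [if_neg hne, if_true]

lemma pvA_fold (prices profit : List Int) :
    ∀ (rest : List Int) (i0 : Nat) (b s : Int) (stri : String),
      rest = profit.drop i0 → rest ≠ [] →
      (PySem.List.pyRange (i0 : Int) (PySem.List.len profit) 1).foldl (pvA_body prices profit)
        (b, s, stri)
      = ((pvRunBS prices (b, s) rest).1, (pvRunBS prices (b, s) rest).2,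
          stri ++ PySem.Str.join "," (pvRun prices (b, s) rest)) := by
  intro rest
  induction rest with
  | nil => intro i0 b s stri _ hne; exact absurd rfl hne
  | cons p rest' ih =>
    intro i0 b s stri hdrop _
    have hlt : i0 < profit.length := by
      by_contra h
      rw [List.drop_eq_nil_of_le (by omega)] at hdrop
      exact absurd hdrop (by simp)
    have hcons : profit.drop i0 = profit[i0] :: profit.drop (i0 + 1) :=
      List.drop_eq_getElem_cons hlt
    rw [hcons] at hdrop
    injection hdrop with hp hrest'
    have hpy : PySem.List.pyGetD profit (i0 : Int) 0 = p := by
      rw [PySem.List.pyGetD_natCast, List.getD_eq_getElem _ _ hlt]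
      exact hp.symm
    rw [PySem.List.len_eq, PySem.List.pyRange_one_cons (by exact_mod_cast hlt),
      List.foldl_cons, pvA_body_eq, hpy, PySem.List.len_eq]
    rcases hr2 : rest' with _ | ⟨q, rest''⟩
    · -- last target: no comma, remaining range empty
      have hlen : profit.length = i0 + 1 := by
        rw [hr2] at hrest'
        have := List.drop_eq_nil_iff.mp hrest'.symm
        omega
      have hcond : ¬ ((i0 : Int) ≠ (profit.length : Int) - 1) := by omega
      rw [if_neg hcond, PySem.List.pyRange_one_eq_nil (by omega), List.foldl_nil]
      simp only [pvRunBS, pvRun, pvJoin_singleton]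
    · -- more targets: comma, recurse
      rw [← hr2]
      have hrne : rest' ≠ [] := by rw [hr2]; simp
      have hlen2 : i0 + 1 < profit.length := by
        by_contra h
        rw [List.drop_eq_nil_of_le (by omega)] at hrest'
        exact absurd hrest' hrne
      have hcond : (i0 : Int) ≠ (profit.length : Int) - 1 := by omega
      rw [if_pos hcond]
      have hcast : ((i0 : Nat) : Int) + 1 = (((i0 + 1 : Nat)) : Int) := by omega
      rw [hcast, ← PySem.List.len_eq,
        ih (i0 + 1) (pvStep1 prices (b, s) p).1.1 (pvStep1 prices (b, s) p).1.2
          (stri ++ (pvStep1 prices (b, s) p).2 ++ ",") hrest' hrne]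
      have heta : ((pvStep1 prices (b, s) p).1.1, (pvStep1 prices (b, s) p).1.2) =
          (pvStep1 prices (b, s) p).1 := rfl
      rw [heta]
      have hjoin : PySem.Str.join "," (pvRun prices (b, s) (p :: rest')) =
          (pvStep1 prices (b, s) p).2 ++ "," ++
            PySem.Str.join "," (pvRun prices (pvStep1 prices (b, s) p).1 rest') := by
        rw [show pvRun prices (b, s) (p :: rest') =
            (pvStep1 prices (b, s) p).2 :: pvRun prices (pvStep1 prices (b, s) p).1 rest' from rfl]
        apply pvJoin_cons
        rw [hr2]
        simp [pvRun]
      rw [hjoin]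
      simp [String.append_assoc, pvRunBS]



-- ===== VERDICT (by name: the statement is the Claim_ definition above) =====
theorem find_min_days_spec : Claim_equal_find_min_days := by
  unfold Claim_equal_find_min_days
  intro prices profit _
  unfold Spec_find_min_days
  rw [pvB_alt_eq]
  by_cases hpf : profit = []
  · subst hpf
    unfold find_min_days
    simp only [PySem.List.len_eq, List.length_nil, Nat.cast_zero]
    rw [PySem.List.pyRange_one_eq_nil (by omega), List.foldl_nil,
      show pvRun prices (-1, -1) [] = [] from rfl]
    decide
  · unfold find_min_days
    have h1 := pvA_fold prices profit profit 0 (-1) (-1) "" (by simp) hpf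
    simp only [Nat.cast_zero] at h1
    rw [h1]
    have hparts : pvRun prices (-1, -1) profit ≠ [] := by
      rcases profit with _ | ⟨p, rest⟩
      · exact absurd rfl hpf
      · simp [pvRun]
    have hSok : pvOk (PySem.Str.join "," (pvRun prices (-1, -1) profit)) :=
      pvJoin_ok _ hparts (pvRun_ok prices profit (-1, -1) (Or.inl rfl))
    have hempty : "" ++ PySem.Str.join "," (pvRun prices (-1, -1) profit) =
        PySem.Str.join "," (pvRun prices (-1, -1) profit) := by
      apply String.toList_inj.mp
      simp
    simp only [hempty]
    rw [if_neg (pvNe_dashonecomma _ hSok)]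
    exact pvStrip_id _ hSok
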